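-- pv_equiv track=rewrite | github.com/jgollub1/pbp_explorations | helper_functions.py | get_set_order
-- ===== SOURCE A (Python) =====
-- def get_set_order(s):
--     s=s.replace('A','S');s=s.replace('D','R')
--     # split the string on '.' and count sets up to the second to last entry
--     # (if the substring ends on a '.' the last element will be '')
--     completed_sets = s.split('.')[:-1]
--     sets = []
--     for k in range(len(completed_sets)):
--         # set server to 0 or 1 at beginning of set, keeping track of all transitions
--         server = 0 if k==0 else next_server
--         games = completed_sets[k].split(';');length = len(games)
--         # update length of games (service switches) if there is tiebreak
--         if length > 12:
--             games = games[:-1] + games[-1].split('/')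
--             next_server = (server+1)%2
--         else:
--             next_server = (server + len(games))%2
--         final_server = (server + len(games) - 1)%2
--         # award set to the player who won the last point of the set
--         if final_server==0 and games[-1][-1]=='S':
--             sets += [0]
--         elif final_server==1 and games[-1][-1]=='R':
--             sets += [0]
--         else:
--             sets += [1]
--     return sets
-- ===== SOURCE B (Python) =====
-- # B: two-phase decomposition — first parse each completed set into (final game
-- # list, service-switch count), then compute each set's starting server as a
-- # prefix sum of switch counts mod 2, then map each set to its winner.
-- def get_set_order(s):
--     s = s.replace('A', 'S').replace('D', 'R')
--     parsed = []
--     for p in s.split('.')[:-1]: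
--         games = p.split(';')
--         if len(games) > 12:
--             games = games[:-1] + games[-1].split('/')
--             switches = 1
--         else:
--             switches = len(games)
--         parsed.append((games, switches))
--     counts = [sw for _, sw in parsed]
--     servers = [sum(counts[:k]) % 2 for k in range(len(parsed))]
--     return [award(games, srv) for (games, _), srv in zip(parsed, servers)]
--
-- def award(games, server):
--     final_server = (server + len(games) - 1) % 2
--     last = games[-1][-1]
--     return 0 if (final_server == 0 and last == 'S') or (final_server == 1 and last == 'R') else 1
-- ===== Notes on version B (the rewrite author's own statement) =====
-- stated objective: alternative
-- what changed: A's single loop that threads the server state while scoring each set is split into three passes: a parse pass building (game list, switch count) per set, a prefix-sum-mod-2 pass giving each set's starting server, and a final map awarding each set.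
import Mathlib
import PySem

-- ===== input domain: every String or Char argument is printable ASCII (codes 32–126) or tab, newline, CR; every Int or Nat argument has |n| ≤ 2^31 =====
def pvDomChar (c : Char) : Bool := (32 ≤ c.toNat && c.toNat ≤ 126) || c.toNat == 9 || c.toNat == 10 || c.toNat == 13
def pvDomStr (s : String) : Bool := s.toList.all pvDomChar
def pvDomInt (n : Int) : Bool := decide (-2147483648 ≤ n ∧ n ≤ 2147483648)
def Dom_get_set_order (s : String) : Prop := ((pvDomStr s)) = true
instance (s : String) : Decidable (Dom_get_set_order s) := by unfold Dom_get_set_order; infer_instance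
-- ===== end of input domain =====

-- B replaces A's single state-threading loop by a parse pass, a prefix-sum-mod-2 server
-- computation and a final map (objective: alternative decomposition, same result).

-- ===== PORT A =====
-- one iteration of A's for-loop: state = (sets so far, next_server)
def pvAStep (st : List Int × Int) (p : List Char) : List Int × Int :=
  let server := st.2
  let games0 := PySem.Chars.splitOn p [';']
  let length := games0.length
  -- split(';') never returns [], so games0.getLast?.getD [] is Python's games[-1]
  let gn := if length > 12 then
      (games0.dropLast ++ PySem.Chars.splitOn (games0.getLast?.getD []) ['/'], PySem.Int.mod (server + 1) 2)
    else (games0, PySem.Int.mod (server + (games0.length : Int)) 2)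
  let games := gn.1
  let next_server := gn.2
  let final_server := PySem.Int.mod (server + (games.length : Int) - 1) 2
  -- games[-1][-1]; none = IndexError in Python, those inputs are excluded by Pre_
  match PySem.List.pyGet? (games.getLast?.getD []) (-1) with
  | some c =>
      if final_server = 0 ∧ c = 'S' then (st.1 ++ [(0 : Int)], next_server)
      else if final_server = 1 ∧ c = 'R' then (st.1 ++ [(0 : Int)], next_server)
      else (st.1 ++ [(1 : Int)], next_server)
  | none => (st.1 ++ [(1 : Int)], next_server)

def get_set_order (s : String) : List Int :=
  let cs := PySem.Chars.replace (PySem.Chars.replace s.toList ['A'] ['S']) ['D'] ['R']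
  let completed_sets := PySem.List.slice (PySem.Chars.splitOn cs ['.']) none (some (-1))
  (completed_sets.foldl pvAStep ([], 0)).1

-- ===== PORT B =====
-- parse one completed set: (final game list, service-switch count)
def pvParse (p : List Char) : List (List Char) × Int :=
  let games := PySem.Chars.splitOn p [';']
  if games.length > 12 then
    (games.dropLast ++ PySem.Chars.splitOn (games.getLast?.getD []) ['/'], 1)
  else (games, (games.length : Int))

-- winner of a set, given its final game list and its starting server
def pvAward (games : List (List Char)) (server : Int) : Int :=
  let final_server := PySem.Int.mod (server + (games.length : Int) - 1) 2
  -- games[-1][-1]; none = IndexError in Python, those inputs are excluded by Pre_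
  match PySem.List.pyGet? (games.getLast?.getD []) (-1) with
  | some c => if (final_server = 0 ∧ c = 'S') ∨ (final_server = 1 ∧ c = 'R') then 0 else 1
  | none => 1

def get_set_order_alt (s : String) : List Int :=
  let cs := PySem.Chars.replace (PySem.Chars.replace s.toList ['A'] ['S']) ['D'] ['R']
  let pieces := PySem.List.slice (PySem.Chars.splitOn cs ['.']) none (some (-1))
  let parsed := pieces.map pvParse
  let counts := parsed.map (·.2)
  let servers := (List.range parsed.length).map (fun k => PySem.Int.mod (counts.take k).sum 2)
  (parsed.zip servers).map (fun x => pvAward x.1.1 x.2)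

-- ===== PRECONDITION & SPEC =====
-- Pre_ excludes exactly the inputs on which A raises IndexError at games[-1][-1]:
-- some completed set whose (tiebreak-adjusted) last game string is empty; B raises there too.
def Pre_get_set_order (s : String) : Prop :=
  ∀ p ∈ (PySem.Chars.splitOn (PySem.Chars.replace (PySem.Chars.replace s.toList ['A'] ['S']) ['D'] ['R']) ['.']).dropLast,
    (if (PySem.Chars.splitOn p [';']).length > 12
     then ((PySem.Chars.splitOn ((PySem.Chars.splitOn p [';']).getLast?.getD []) ['/']).getLast?.getD []) ≠ []
     else (PySem.Chars.splitOn p [';']).getLast?.getD [] ≠ [])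
instance (s : String) : Decidable (Pre_get_set_order s) := by unfold Pre_get_set_order; infer_instance
def pvWitness_get_set_order : String := "S;R;S;S.R/S;S;R."
def Spec_get_set_order (s : String) (out : List Int) : Prop := out = get_set_order_alt s
instance (s : String) (out : List Int) : Decidable (Spec_get_set_order s out) := by unfold Spec_get_set_order; infer_instance

-- ===== CLAIM (what is proved, stated in full; the proofs are below) =====
def Claim_equal_get_set_order : Prop := ∀ (s : String), Dom_get_set_order s → Pre_get_set_order s → Spec_get_set_order s (get_set_order s)

-- ===== LEMMAS AND PROOFS =====

-- spine mirroring A's state threading, expressed on B's parsed list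
def pvSpine : List (List (List Char) × Int) → Int → List Int
  | [], _ => []
  | x :: rest, srv => pvAward x.1 srv :: pvSpine rest (PySem.Int.mod (srv + x.2) 2)

theorem pvAStep_eq (st : List Int × Int) (p : List Char) :
    pvAStep st p = (st.1 ++ [pvAward (pvParse p).1 st.2], PySem.Int.mod (st.2 + (pvParse p).2) 2) := by
  simp only [pvAStep, pvParse, pvAward]
  by_cases h : (PySem.Chars.splitOn p [';']).length > 12 <;>
    simp only [h, if_true, if_false] <;>
    split <;> simp_all <;> split_ifs <;> simp_all <;> tauto

theorem pvFoldl_spine (ps : List (List Char)) (acc : List Int) (srv : Int) :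
    (ps.foldl pvAStep (acc, srv)).1 = acc ++ pvSpine (ps.map pvParse) srv := by
  induction ps generalizing acc srv with
  | nil => simp [pvSpine]
  | cons p rest ih =>
      simp only [List.foldl_cons, List.map_cons]
      rw [pvAStep_eq, ih]
      simp [pvSpine]

theorem pvMod_two_shift (a b : Int) :
    PySem.Int.mod (PySem.Int.mod a 2 + b) 2 = PySem.Int.mod (a + b) 2 := by
  rw [PySem.Int.mod_eq_emod_of_pos (by omega), PySem.Int.mod_eq_emod_of_pos (by omega),
      PySem.Int.mod_eq_emod_of_pos (by omega)]
  omega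

theorem pvZip_spine (parsed : List (List (List Char) × Int)) (b : Int) :
    (parsed.zip ((List.range parsed.length).map
        (fun k => PySem.Int.mod (b + ((parsed.map (·.2)).take k).sum) 2))).map (fun x => pvAward x.1.1 x.2)
      = pvSpine parsed (PySem.Int.mod b 2) := by
  induction parsed generalizing b with
  | nil => simp [pvSpine]
  | cons hd rest ih =>
      simp only [List.length_cons, List.range_succ_eq_map, List.map_cons, List.map_map,
        List.zip_cons_cons, pvSpine, Function.comp_def, Nat.succ_eq_add_one, List.take_zero,
        List.sum_nil, add_zero]
      congr 1
      rw [pvMod_two_shift]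
      have harg : ((List.range rest.length).map
            (fun k => PySem.Int.mod (b + ((hd.2 :: rest.map (·.2)).take (k + 1)).sum) 2))
          = (List.range rest.length).map
            (fun k => PySem.Int.mod ((b + hd.2) + ((rest.map (·.2)).take k).sum) 2) := by
        refine List.map_congr_left (fun k _ => ?_)
        simp [List.take_succ_cons, add_assoc]
      rw [harg, ih (b + hd.2)]

-- ===== VERDICT (by name: the statement is the Claim_ definition above) =====
theorem get_set_order_spec : Claim_equal_get_set_order := by
  intro s _ _
  simp only [Spec_get_set_order, get_set_order, get_set_order_alt]
  have h02 : PySem.Int.mod 0 2 = (0 : Int) := by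
    rw [PySem.Int.mod_eq_emod_of_pos (by omega)]
    decide
  have h := pvZip_spine ((PySem.List.slice (PySem.Chars.splitOn
      (PySem.Chars.replace (PySem.Chars.replace s.toList ['A'] ['S']) ['D'] ['R']) ['.'])
      none (some (-1))).map pvParse) 0
  rw [h02] at h
  simp only [zero_add] at h
  rw [pvFoldl_spine, List.nil_append]
  exact h.symm
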